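-- pv_equiv track=rewrite | github.com/SamNel2000/Cyclic-Sums | Stolen CSS checker.py | isCSS
-- ===== SOURCE A (Python) =====
-- def isCSS(L):
--     seen = []
--     n = len(L)
--     for i in range(1, n):
--         for start in range(0, n):
--             Sum = 0
--             for j in range(0, i):
--                 Sum = Sum + L[(start + j) % n]
--             if Sum in seen:
--                 return False
--             seen.append(Sum)
--     return True
-- ===== SOURCE B (Python) =====
-- def isCSS(L):
--     n = len(L)
--     P = [0]
--     acc = 0
--     for x in L + L:
--         acc += x
--         P.append(acc)
--     seen = set()
--     for i in range(1, n):
--         for s in range(n):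
--             v = P[s + i] - P[s]
--             if v in seen:
--                 return False
--             seen.add(v)
--     return True
-- ===== Notes on version B (the rewrite author's own statement) =====
-- stated objective: alternative
-- what changed: B precomputes prefix sums of L + L so each cyclic window sum is a difference of two prefix sums instead of an inner re-summing loop, and tracks already-seen sums in a set instead of scanning a list.
import Mathlib
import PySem

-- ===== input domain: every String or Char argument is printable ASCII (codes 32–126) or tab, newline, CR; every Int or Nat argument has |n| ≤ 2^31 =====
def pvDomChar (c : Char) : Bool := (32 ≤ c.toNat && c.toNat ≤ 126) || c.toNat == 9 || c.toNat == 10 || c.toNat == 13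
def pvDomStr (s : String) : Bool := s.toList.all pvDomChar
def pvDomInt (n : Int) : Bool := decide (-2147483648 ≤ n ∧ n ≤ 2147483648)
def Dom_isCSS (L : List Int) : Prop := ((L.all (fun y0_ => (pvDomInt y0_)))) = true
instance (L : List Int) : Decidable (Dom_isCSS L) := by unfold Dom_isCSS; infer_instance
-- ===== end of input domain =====

-- B computes each cyclic window sum as a difference of two prefix sums of L ++ L instead of
-- re-summing the window with an inner loop, and checks duplicates with a set instead of a list scan.

-- ===== PORT A =====
-- L[(start+j) % n] : the index is always in range (0 ≤ (start+j) % n < n = len L whenever the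
-- loop body runs), so pyGetD with default 0 is exact here.
def isCSS (L : List Int) : Bool :=
  let n : Int := PySem.List.len L
  match (PySem.List.pyRange 1 n 1).foldl (fun acc i =>
      (PySem.List.pyRange 0 n 1).foldl (fun acc start =>
        match acc with
        | none => none
        | some seen =>
          let Sum : Int := (PySem.List.pyRange 0 i 1).foldl
            (fun Sum j => Sum + PySem.List.pyGetD L (PySem.Int.mod (start + j) n) 0) 0
          if Sum ∈ seen then none else some (seen ++ [Sum])) acc)
    (some ([] : List Int)) with
  | none => false
  | some _ => true

-- ===== PORT B =====
-- P[s+i], P[s] : 0 ≤ s < s+i ≤ 2n = len P - 1, always in range, so pyGetD with default 0 is exact.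
def isCSS_alt (L : List Int) : Bool :=
  let n : Int := PySem.List.len L
  let st := (L ++ L).foldl (fun (st : List Int × Int) x =>
    let acc := st.2 + x
    (st.1 ++ [acc], acc)) ([0], 0)
  let P := st.1
  match (PySem.List.pyRange 1 n 1).foldl (fun acc i =>
      (PySem.List.pyRange 0 n 1).foldl (fun acc s =>
        match acc with
        | none => none
        | some seen =>
          let v : Int := PySem.List.pyGetD P (s + i) 0 - PySem.List.pyGetD P s 0
          if PySem.Set.contains seen v then none else some (PySem.Set.add seen v)) acc)
    (some (PySem.Set.empty : PySem.Set Int)) with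
  | none => false
  | some _ => true

-- ===== PRECONDITION & SPEC =====
def Spec_isCSS (L : List Int) (out : Bool) : Prop := out = isCSS_alt L
instance (L : List Int) (out : Bool) : Decidable (Spec_isCSS L out) := by unfold Spec_isCSS; infer_instance

-- ===== CLAIM (what is proved, stated in full; the proofs are below) =====
def Claim_equal_isCSS : Prop := ∀ (L : List Int), Dom_isCSS L → Spec_isCSS L (isCSS L)

-- ===== LEMMAS AND PROOFS =====

-- the canonical value of the cyclic window sum starting at s of length i
def pvWin (L : List Int) (s i : Int) : Int := (((L ++ L).drop s.toNat).take i.toNat).sum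

-- the list of all window sums, in the order both loops visit them
def pvV (L : List Int) : List Int :=
  (PySem.List.pyRange 1 (L.length : Int) 1).flatMap (fun i =>
    (PySem.List.pyRange 0 (L.length : Int) 1).map (fun s => pvWin L s i))

-- A's duplicate-scan step
def pvStep (acc : Option (List Int)) (v : Int) : Option (List Int) :=
  match acc with
  | none => none
  | some seen => if v ∈ seen then none else some (seen ++ [v])

theorem pvStep_none (vs : List Int) : vs.foldl pvStep none = none := by
  induction vs with
  | nil => rfl
  | cons v vs ih => simpa [pvStep] using ih

theorem pvScan (vs : List Int) : ∀ seen : List Int, seen.Nodup →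
    vs.foldl pvStep (some seen) =
      if (seen ++ vs).Nodup then some (seen ++ vs) else none := by
  induction vs with
  | nil => intro seen h; simp [h]
  | cons v vs ih =>
    intro seen h
    rw [List.foldl_cons]
    by_cases hv : v ∈ seen
    · have hnd : ¬ (seen ++ v :: vs).Nodup := fun hnd =>
        (List.disjoint_of_nodup_append hnd) hv (by simp)
      rw [show pvStep (some seen) v = none from by simp [pvStep, hv]]
      simp [pvStep_none, hnd]
    · have h2 : (seen ++ [v]).Nodup := by
        rw [List.nodup_append]
        refine ⟨h, List.nodup_singleton v, ?_⟩
        intro a ha b hb he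
        have hb2 : b = v := by simpa using hb
        exact hv (by rw [← hb2, ← he]; exact ha)
      rw [show pvStep (some seen) v = some (seen ++ [v]) from by simp [pvStep, hv]]
      rw [ih _ h2]
      have hre : seen ++ [v] ++ vs = seen ++ v :: vs := by simp
      rw [hre]

-- window-sum congruence: any per-pair function agreeing with pvWin on the visited index
-- ranges produces exactly the list pvV L
theorem pvV_congr (L : List Int) (f : Int → Int → Int)
    (h : ∀ i s : Int, 1 ≤ i → i < (L.length : Int) → 0 ≤ s → s < (L.length : Int) →
      f i s = pvWin L s i) :
    (PySem.List.pyRange 1 (L.length : Int) 1).flatMap (fun i =>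
      (PySem.List.pyRange 0 (L.length : Int) 1).map (fun s => f i s)) = pvV L := by
  unfold pvV
  rw [List.flatMap_def, List.flatMap_def]
  congr 1
  apply List.map_congr_left
  intro i hi
  apply List.map_congr_left
  intro s hs
  rw [PySem.List.mem_pyRange_one] at hi hs
  exact h i s hi.1 hi.2 hs.1 hs.2

-- indexing the doubled list L ++ L is indexing L at the cyclic index
theorem pvGetMod (L : List Int) (k : Nat) (hk : k < 2 * L.length) :
    L.getD (k % L.length) 0 = (L ++ L).getD k 0 := by
  have h0 : 0 < L.length := by omega
  by_cases h : k < L.length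
  · rw [Nat.mod_eq_of_lt h, List.getD_append _ _ _ _ h]
  · have h1 : k % L.length = k - L.length := by
      rw [Nat.mod_eq_sub_mod (by omega), Nat.mod_eq_of_lt (by omega)]
    rw [h1, List.getD_eq_getElem?_getD, List.getD_eq_getElem?_getD,
      List.getElem?_append_right (by omega)]

-- a sum of getD's over range a starting at b is the sum of the slice M[b : b+a]
theorem pvRangeSum (M : List Int) (b a : Nat) (h : b + a ≤ M.length) :
    ((List.range a).map (fun j => M.getD (b + j) 0)).sum = ((M.drop b).take a).sum := by
  induction a with
  | zero => simp
  | succ a ih =>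
    rw [List.range_succ, List.map_append, List.sum_append, ih (by omega),
      List.take_add_one, List.sum_append]
    have : (M.drop b)[a]? = some (M.getD (b + a) 0) := by
      rw [List.getElem?_drop]
      rw [List.getD_eq_getElem?_getD, List.getElem?_eq_getElem (by omega)]
      simp
    simp [this]

-- A's innermost loop computes pvWin
theorem pvInnerA (L : List Int) (s i : Int) (hs0 : 0 ≤ s) (hs : s < (L.length : Int))
    (hi0 : 0 ≤ i) (hi : i ≤ (L.length : Int)) :
    (PySem.List.pyRange 0 i 1).foldl
      (fun Sum j => Sum + PySem.List.pyGetD L (PySem.Int.mod (s + j) (L.length : Int)) 0) 0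
      = pvWin L s i := by
  obtain ⟨a, rfl⟩ : ∃ a : Nat, i = (a : Int) := ⟨i.toNat, (Int.toNat_of_nonneg hi0).symm⟩
  obtain ⟨b, rfl⟩ : ∃ b : Nat, s = (b : Int) := ⟨s.toNat, (Int.toNat_of_nonneg hs0).symm⟩
  rw [PySem.List.pyRange_zero_natCast, PySem.List.foldl_add, List.map_map, zero_add]
  unfold pvWin
  rw [Int.toNat_natCast, Int.toNat_natCast]
  rw [← pvRangeSum (L ++ L) b a (by simp; omega)]
  apply congrArg
  apply List.map_congr_left
  intro j hj
  rw [List.mem_range] at hj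
  show PySem.List.pyGetD L (PySem.Int.mod ((b : Int) + (j : Int)) (L.length : Int)) 0
      = (L ++ L).getD (b + j) 0
  rw [← Nat.cast_add, PySem.Int.mod_natCast, PySem.List.pyGetD_natCast]
  exact pvGetMod L (b + j) (by omega)

theorem pvA_char (L : List Int) : isCSS L = decide (pvV L).Nodup := by
  unfold isCSS
  simp only [PySem.List.len_eq]
  have hfold :
      (PySem.List.pyRange 1 (L.length : Int) 1).foldl (fun acc i =>
        (PySem.List.pyRange 0 (L.length : Int) 1).foldl (fun acc start =>
          match acc with
          | none => none
          | some seen =>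
            let Sum : Int := (PySem.List.pyRange 0 i 1).foldl
              (fun Sum j => Sum + PySem.List.pyGetD L (PySem.Int.mod (start + j) (L.length : Int)) 0) 0
            if Sum ∈ seen then none else some (seen ++ [Sum])) acc)
        (some ([] : List Int))
      = if (pvV L).Nodup then some (pvV L) else none := by
    have h1 : ∀ (i : Int) (acc : Option (List Int)),
        (PySem.List.pyRange 0 (L.length : Int) 1).foldl (fun acc start =>
          match acc with
          | none => none
          | some seen =>
            let Sum : Int := (PySem.List.pyRange 0 i 1).foldl
              (fun Sum j => Sum + PySem.List.pyGetD L (PySem.Int.mod (start + j) (L.length : Int)) 0) 0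
            if Sum ∈ seen then none else some (seen ++ [Sum])) acc
        = ((PySem.List.pyRange 0 (L.length : Int) 1).map (fun start =>
            (PySem.List.pyRange 0 i 1).foldl
              (fun Sum j => Sum + PySem.List.pyGetD L (PySem.Int.mod (start + j) (L.length : Int)) 0) 0)).foldl
            pvStep acc := by
      intro i acc
      rw [List.foldl_map]
      rfl
    calc _ = (PySem.List.pyRange 1 (L.length : Int) 1).foldl (fun acc i =>
            ((PySem.List.pyRange 0 (L.length : Int) 1).map (fun start =>
              (PySem.List.pyRange 0 i 1).foldl
                (fun Sum j => Sum + PySem.List.pyGetD L (PySem.Int.mod (start + j) (L.length : Int)) 0) 0)).foldl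
              pvStep acc) (some ([] : List Int)) := by
          exact PySem.List.foldl_congr_mem _ _ _ _ (fun acc i _ => h1 i acc)
      _ = ((PySem.List.pyRange 1 (L.length : Int) 1).flatMap (fun i =>
            (PySem.List.pyRange 0 (L.length : Int) 1).map (fun start =>
              (PySem.List.pyRange 0 i 1).foldl
                (fun Sum j => Sum + PySem.List.pyGetD L (PySem.Int.mod (start + j) (L.length : Int)) 0) 0))).foldl
            pvStep (some ([] : List Int)) := by
          rw [List.flatMap_def, List.foldl_flatten, List.foldl_map]
      _ = (pvV L).foldl pvStep (some ([] : List Int)) := by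
          rw [pvV_congr L _ (fun i s hi1 hi2 hs1 hs2 =>
            pvInnerA L s i hs1 hs2 (by omega) (by omega))]
      _ = if (pvV L).Nodup then some (pvV L) else none := by
          simpa using pvScan (pvV L) [] List.nodup_nil
  rw [hfold]
  split_ifs with h <;> simp [h]

-- B's prefix-sum loop builds the list of all prefix sums of M (and carries M.sum)
theorem pvPrefix (M : List Int) :
    M.foldl (fun (st : List Int × Int) x => (st.1 ++ [st.2 + x], st.2 + x)) (([0], 0) : List Int × Int)
      = ((List.range (M.length + 1)).map (fun k => (M.take k).sum), M.sum) := by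
  induction M using List.reverseRecOn with
  | nil => simp
  | append_singleton M x ih =>
    rw [List.foldl_append, ih]
    simp only [List.foldl_cons, List.foldl_nil]
    refine Prod.ext_iff.mpr ⟨?_, ?_⟩
    · show List.map (fun k => (List.take k M).sum) (List.range (M.length + 1)) ++ [M.sum + x]
        = List.map (fun k => (List.take k (M ++ [x])).sum) (List.range ((M ++ [x]).length + 1))
      conv_rhs => rw [List.length_append, List.length_singleton, List.range_succ, List.map_append]
      congr 1
      · apply List.map_congr_left
        intro k hk
        rw [List.mem_range] at hk
        rw [List.take_append_of_le_length (by omega)]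
      · simp
    · simp

-- B's window value (difference of two prefix sums) is pvWin
theorem pvInnerB (L : List Int) (s i : Int) (hs0 : 0 ≤ s) (hs : s < (L.length : Int))
    (hi0 : 0 ≤ i) (hi : i ≤ (L.length : Int)) :
    PySem.List.pyGetD ((List.range ((L ++ L).length + 1)).map (fun k => ((L ++ L).take k).sum)) (s + i) 0
      - PySem.List.pyGetD ((List.range ((L ++ L).length + 1)).map (fun k => ((L ++ L).take k).sum)) s 0
      = pvWin L s i := by
  obtain ⟨a, rfl⟩ : ∃ a : Nat, i = (a : Int) := ⟨i.toNat, (Int.toNat_of_nonneg hi0).symm⟩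
  obtain ⟨b, rfl⟩ : ∃ b : Nat, s = (b : Int) := ⟨s.toNat, (Int.toNat_of_nonneg hs0).symm⟩
  rw [← Nat.cast_add, PySem.List.pyGetD_natCast, PySem.List.pyGetD_natCast]
  have hlen : (L ++ L).length = L.length + L.length := List.length_append
  rw [PySem.List.getD_map_range _ _ _ _ (by omega), PySem.List.getD_map_range _ _ _ _ (by omega)]
  unfold pvWin
  rw [Int.toNat_natCast, Int.toNat_natCast, List.take_add, List.sum_append]
  ring

-- B's duplicate-scan step over a set
def pvStepS (acc : Option (PySem.Set Int)) (v : Int) : Option (PySem.Set Int) :=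
  match acc with
  | none => none
  | some seen => if PySem.Set.contains seen v then none else some (PySem.Set.add seen v)

theorem pvStepS_none (vs : List Int) : vs.foldl pvStepS none = none := by
  induction vs with
  | nil => rfl
  | cons v vs ih => simpa [pvStepS] using ih

theorem pvScanS (vs : List Int) : ∀ seen : PySem.Set Int, seen.Nodup →
    vs.foldl pvStepS (some seen) =
      if (seen ++ vs).Nodup then some ((seen ++ vs : List Int) : PySem.Set Int) else none := by
  induction vs with
  | nil => intro seen h; simp [h]
  | cons v vs ih =>
    intro seen h
    rw [List.foldl_cons]
    by_cases hv : v ∈ seen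
    · have hnd : ¬ (seen ++ v :: vs).Nodup := fun hnd =>
        (List.disjoint_of_nodup_append hnd) hv (by simp)
      rw [show pvStepS (some seen) v = none from by simp [pvStepS, hv]]
      simp [pvStepS_none, hnd]
    · have hc : PySem.Set.contains seen v = false := by
        rw [Bool.eq_false_iff]
        intro hc
        exact hv ((PySem.Set.contains_iff _ _).mp hc)
      have hadd : PySem.Set.add seen v = seen ++ [v] := by
        unfold PySem.Set.add
        rw [hc]
        simp
      have h2 : ((seen ++ [v] : List Int) : PySem.Set Int).Nodup := by
        rw [List.nodup_append]
        refine ⟨h, List.nodup_singleton v, ?_⟩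
        intro a ha b hb he
        have hb2 : b = v := by simpa using hb
        exact hv (by rw [← hb2, ← he]; exact ha)
      rw [show pvStepS (some seen) v = some (PySem.Set.add seen v) from by simp [pvStepS, hv]]
      rw [hadd, ih _ h2]
      have hre : seen ++ [v] ++ vs = seen ++ v :: vs := by simp
      rw [hre]

theorem pvB_char (L : List Int) : isCSS_alt L = decide (pvV L).Nodup := by
  unfold isCSS_alt
  simp only [PySem.List.len_eq]
  rw [pvPrefix (L ++ L)]
  simp only []
  have h1 : ∀ (i : Int) (acc : Option (PySem.Set Int)),
      (PySem.List.pyRange 0 (L.length : Int) 1).foldl (fun acc s =>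
        match acc with
        | none => none
        | some seen =>
          let v : Int := PySem.List.pyGetD ((List.range ((L ++ L).length + 1)).map (fun k => ((L ++ L).take k).sum)) (s + i) 0
            - PySem.List.pyGetD ((List.range ((L ++ L).length + 1)).map (fun k => ((L ++ L).take k).sum)) s 0
          if PySem.Set.contains seen v then none else some (PySem.Set.add seen v)) acc
      = ((PySem.List.pyRange 0 (L.length : Int) 1).map (fun s =>
          PySem.List.pyGetD ((List.range ((L ++ L).length + 1)).map (fun k => ((L ++ L).take k).sum)) (s + i) 0
            - PySem.List.pyGetD ((List.range ((L ++ L).length + 1)).map (fun k => ((L ++ L).take k).sum)) s 0)).foldl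
          pvStepS acc := by
    intro i acc
    rw [List.foldl_map]
    rfl
  have hfold :
      (PySem.List.pyRange 1 (L.length : Int) 1).foldl (fun acc i =>
        (PySem.List.pyRange 0 (L.length : Int) 1).foldl (fun acc s =>
          match acc with
          | none => none
          | some seen =>
            let v : Int := PySem.List.pyGetD ((List.range ((L ++ L).length + 1)).map (fun k => ((L ++ L).take k).sum)) (s + i) 0
              - PySem.List.pyGetD ((List.range ((L ++ L).length + 1)).map (fun k => ((L ++ L).take k).sum)) s 0
            if PySem.Set.contains seen v then none else some (PySem.Set.add seen v)) acc)
        (some (PySem.Set.empty : PySem.Set Int))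
      = if (pvV L).Nodup then some ((pvV L : List Int) : PySem.Set Int) else none := by
    calc _ = (PySem.List.pyRange 1 (L.length : Int) 1).foldl (fun acc i =>
            ((PySem.List.pyRange 0 (L.length : Int) 1).map (fun s =>
              PySem.List.pyGetD ((List.range ((L ++ L).length + 1)).map (fun k => ((L ++ L).take k).sum)) (s + i) 0
                - PySem.List.pyGetD ((List.range ((L ++ L).length + 1)).map (fun k => ((L ++ L).take k).sum)) s 0)).foldl
              pvStepS acc) (some (PySem.Set.empty : PySem.Set Int)) := by
          exact PySem.List.foldl_congr_mem _ _ _ _ (fun acc i _ => h1 i acc)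
      _ = ((PySem.List.pyRange 1 (L.length : Int) 1).flatMap (fun i =>
            (PySem.List.pyRange 0 (L.length : Int) 1).map (fun s =>
              PySem.List.pyGetD ((List.range ((L ++ L).length + 1)).map (fun k => ((L ++ L).take k).sum)) (s + i) 0
                - PySem.List.pyGetD ((List.range ((L ++ L).length + 1)).map (fun k => ((L ++ L).take k).sum)) s 0))).foldl
            pvStepS (some (PySem.Set.empty : PySem.Set Int)) := by
          rw [List.flatMap_def, List.foldl_flatten, List.foldl_map]
      _ = (pvV L).foldl pvStepS (some (PySem.Set.empty : PySem.Set Int)) := by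
          rw [pvV_congr L _ (fun i s hi1 hi2 hs1 hs2 =>
            pvInnerB L s i hs1 hs2 (by omega) (by omega))]
      _ = if (pvV L).Nodup then some ((pvV L : List Int) : PySem.Set Int) else none := by
          simpa using pvScanS (pvV L) PySem.Set.empty List.nodup_nil
  rw [hfold]
  split_ifs with h <;> simp [h]

-- ===== VERDICT (by name: the statement is the Claim_ definition above) =====
theorem isCSS_spec : Claim_equal_isCSS := by
  intro L _
  unfold Spec_isCSS
  rw [pvA_char, pvB_char]
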